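-- pv_equiv track=rewrite | github.com/mindspore-ai/hyper-parallel | .agentic/skills/autogit/scripts/pr_content.py | _build_skill_section
-- ===== SOURCE A (Python) =====
-- from typing import Dict, List, Optional, Tuple
--
-- def _build_skill_section(skill_files: List[str]) -> List[str]:
--     """Build the Skill authoring guidelines section.
--
--     Args:
--         skill_files: List of skill-related file paths.
--
--     Returns:
--         List of formatted lines.
--     """
--     desc_parts: List[str] = []
--     has_skill_md = any(f.endswith('SKILL.md') for f in skill_files)
--     has_scripts = any('/scripts/' in f for f in skill_files)
--     has_readme = any(f == 'skills/README.md' for f in skill_files)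
--     desc_parts.append("### Skill 创作规范\n")
--     desc_parts.append("遵循 Claude Code Skill 标准目录结构：")
--     if has_skill_md:
--         desc_parts.append("- `SKILL.md` — Skill 元数据、触发场景、命令文档")
--     if has_scripts:
--         desc_parts.append("- `scripts/` — 可执行脚本，提供 CLI 入口")
--     if has_readme:
--         desc_parts.append("- `skills/README.md` — Skills 总览与创作指南")
--     desc_parts.append("")
--     return desc_parts
-- ===== SOURCE B (Python) =====
-- from typing import List
--
-- # Table of (trigger predicate, bullet line): the section content is data, not code.
-- _BULLETS = [
--     (lambda f: f.endswith('SKILL.md'), "- `SKILL.md` — Skill 元数据、触发场景、命令文档"),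
--     (lambda f: '/scripts/' in f, "- `scripts/` — 可执行脚本，提供 CLI 入口"),
--     (lambda f: f == 'skills/README.md', "- `skills/README.md` — Skills 总览与创作指南"),
-- ]
--
-- def _build_skill_section(skill_files: List[str]) -> List[str]:
--     """Table-driven: collect the set of triggered bullet indices in one pass
--     (stopping early once every bullet is triggered), then emit the header,
--     the triggered table lines in table order, and the footer."""
--     found = set()
--     for f in skill_files:
--         for i, (pred, _) in enumerate(_BULLETS):
--             if pred(f):
--                 found.add(i)
--         if len(found) == 3:
--             break
--     return (["### Skill 创作规范\n", "遵循 Claude Code Skill 标准目录结构："]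
--             + [line for i, (_, line) in enumerate(_BULLETS) if i in found]
--             + [""])
-- ===== Notes on version B (the rewrite author's own statement) =====
-- stated objective: alternative
-- what changed: B is table-driven: the three (predicate, line) pairs become a data table, one early-exiting pass over skill_files collects the set of triggered table indices, and the bullet lines are emitted by filtering the table on that set instead of A's three any() scans followed by an if-chain.
import Mathlib
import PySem

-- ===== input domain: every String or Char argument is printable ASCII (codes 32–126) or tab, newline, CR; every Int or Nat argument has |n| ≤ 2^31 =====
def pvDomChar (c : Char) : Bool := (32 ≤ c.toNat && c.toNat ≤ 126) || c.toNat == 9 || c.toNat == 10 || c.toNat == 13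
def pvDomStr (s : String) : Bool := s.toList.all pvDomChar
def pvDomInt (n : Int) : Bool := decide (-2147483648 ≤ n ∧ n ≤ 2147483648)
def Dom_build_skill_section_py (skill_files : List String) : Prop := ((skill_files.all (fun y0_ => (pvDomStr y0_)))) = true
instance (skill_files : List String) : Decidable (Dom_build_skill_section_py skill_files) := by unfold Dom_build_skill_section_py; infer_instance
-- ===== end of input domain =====

-- B is table-driven: a (predicate, line) table, one early-exiting pass collecting the set of
-- triggered indices, then the bullets emitted by filtering the table — instead of A's three any()
-- scans and an if-chain (objective: alternative decomposition, same cost).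

-- ===== PORT A =====
def build_skill_section_py (skill_files : List String) : List String :=
  let has_skill_md := skill_files.any (fun f => PySem.Str.endswith f "SKILL.md")
  let has_scripts := skill_files.any (fun f => PySem.Str.isIn "/scripts/" f)
  let has_readme := skill_files.any (fun f => f == "skills/README.md")
  let desc_parts : List String := []
  let desc_parts := desc_parts ++ ["### Skill 创作规范\n"]
  let desc_parts := desc_parts ++ ["遵循 Claude Code Skill 标准目录结构："]
  let desc_parts := if has_skill_md then desc_parts ++ ["- `SKILL.md` — Skill 元数据、触发场景、命令文档"] else desc_parts
  let desc_parts := if has_scripts then desc_parts ++ ["- `scripts/` — 可执行脚本，提供 CLI 入口"] else desc_parts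
  let desc_parts := if has_readme then desc_parts ++ ["- `skills/README.md` — Skills 总览与创作指南"] else desc_parts
  desc_parts ++ [""]

-- ===== PORT B =====
-- the _BULLETS table of Source B
def pvBullets : List ((String → Bool) × String) :=
  [(fun f => PySem.Str.endswith f "SKILL.md", "- `SKILL.md` — Skill 元数据、触发场景、命令文档"),
   (fun f => PySem.Str.isIn "/scripts/" f, "- `scripts/` — 可执行脚本，提供 CLI 入口"),
   (fun f => f == "skills/README.md", "- `skills/README.md` — Skills 总览与创作指南")]

-- the inner 'for i, (pred, _) in enumerate(_BULLETS): if pred(f): found.add(i)'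
def pvStep (found : PySem.Set Int) (f : String) : PySem.Set Int :=
  (PySem.List.enumerate pvBullets).foldl
    (fun acc pr => if pr.2.1 f then PySem.Set.add acc pr.1 else acc) found

-- the outer 'for f in skill_files: … ; if len(found) == 3: break'
def pvCollect : List String → PySem.Set Int → PySem.Set Int
  | [], found => found
  | f :: rest, found =>
      let found' := pvStep found f
      if PySem.Set.len found' == 3 then found' else pvCollect rest found'

def build_skill_section_py_alt (skill_files : List String) : List String :=
  let found := pvCollect skill_files PySem.Set.empty
  ["### Skill 创作规范\n", "遵循 Claude Code Skill 标准目录结构："]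
    ++ ((PySem.List.enumerate pvBullets).filter
          (fun pr => PySem.Set.contains found pr.1)).map (fun pr => pr.2.2)
    ++ [""]

-- ===== PRECONDITION & SPEC =====
def Spec_build_skill_section_py (skill_files : List String) (out : List String) : Prop := out = build_skill_section_py_alt skill_files
instance (skill_files : List String) (out : List String) : Decidable (Spec_build_skill_section_py skill_files out) := by unfold Spec_build_skill_section_py; infer_instance

-- ===== CLAIM =====
def Claim_equal_build_skill_section_py : Prop := ∀ (skill_files : List String), Dom_build_skill_section_py skill_files → Spec_build_skill_section_py skill_files (build_skill_section_py skill_files)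

-- ===== LEMMAS AND PROOFS =====
-- what a single file contributes to the index set
def pvHit (x : Int) (f : String) : Prop :=
  (x = 0 ∧ PySem.Str.endswith f "SKILL.md" = true) ∨
  (x = 1 ∧ PySem.Str.isIn "/scripts/" f = true) ∨
  (x = 2 ∧ (f == "skills/README.md") = true)

theorem mem_pvStep (found : PySem.Set Int) (f : String) (x : Int) :
    x ∈ pvStep found f ↔ x ∈ found ∨ pvHit x f := by
  unfold pvStep pvBullets pvHit
  simp only [PySem.List.enumerate_cons, PySem.List.enumerate_nil, List.foldl]
  split_ifs <;> simp_all [PySem.Set.mem_add] <;> tauto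

theorem nodup_pvStep (found : PySem.Set Int) (f : String) (h : found.Nodup) :
    (pvStep found f).Nodup := by
  unfold pvStep pvBullets
  simp only [PySem.List.enumerate_cons, PySem.List.enumerate_nil, List.foldl]
  split_ifs <;> repeat first | assumption | apply PySem.Set.nodup_add

theorem bound_pvStep (found : PySem.Set Int) (f : String)
    (h : ∀ x ∈ found, x = 0 ∨ x = 1 ∨ x = 2) :
    ∀ x ∈ pvStep found f, x = 0 ∨ x = 1 ∨ x = 2 := by
  intro x hx
  rcases (mem_pvStep found f x).1 hx with h' | h'
  · exact h x h'
  · unfold pvHit at h'; tauto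

theorem full_of_len3 (l : List Int) (hn : l.Nodup)
    (hb : ∀ x ∈ l, x = 0 ∨ x = 1 ∨ x = 2) (hl : l.length = 3) :
    ∀ x : Int, (x = 0 ∨ x = 1 ∨ x = 2) → x ∈ l := by
  intro x hx
  have hsub : l.toFinset ⊆ ({0, 1, 2} : Finset Int) := by
    intro y hy
    have := hb y (List.mem_toFinset.mp hy)
    simp [Finset.mem_insert]; tauto
  have hcard : ({0, 1, 2} : Finset Int).card ≤ l.toFinset.card := by
    rw [List.toFinset_card_of_nodup hn, hl]; decide
  have heq : l.toFinset = ({0, 1, 2} : Finset Int) :=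
    Finset.eq_of_subset_of_card_le hsub hcard
  have : x ∈ l.toFinset := by rw [heq]; simp [Finset.mem_insert]; tauto
  exact List.mem_toFinset.mp this

theorem mem_pvCollect (fs : List String) (found : PySem.Set Int)
    (hn : found.Nodup) (hb : ∀ x ∈ found, x = 0 ∨ x = 1 ∨ x = 2)
    (x : Int) (hx : x = 0 ∨ x = 1 ∨ x = 2) :
    x ∈ pvCollect fs found ↔ x ∈ found ∨ ∃ f ∈ fs, pvHit x f := by
  induction fs generalizing found with
  | nil => simp [pvCollect]
  | cons f rest ih =>
    unfold pvCollect
    by_cases hlen : (PySem.Set.len (pvStep found f) == 3) = true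
    · rw [if_pos hlen]
      have h' : ((pvStep found f).length : Int) = 3 := by
        have h'' : PySem.Set.len (pvStep found f) = 3 := by simpa using hlen
        exact h''
      have hlen3 : (pvStep found f).length = 3 := by exact_mod_cast h'
      have hfull := full_of_len3 _ (nodup_pvStep found f hn) (bound_pvStep found f hb) hlen3 x hx
      constructor
      · intro h
        rcases (mem_pvStep found f x).1 h with h1 | h1
        · exact Or.inl h1
        · exact Or.inr ⟨f, List.mem_cons_self .., h1⟩
      · intro _; exact hfull
    · rw [if_neg hlen]
      rw [ih (pvStep found f) (nodup_pvStep found f hn) (bound_pvStep found f hb),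
          mem_pvStep]
      simp only [List.mem_cons]
      constructor
      · rintro ((h | h) | ⟨g, hg, h⟩)
        · exact Or.inl h
        · exact Or.inr ⟨f, Or.inl rfl, h⟩
        · exact Or.inr ⟨g, Or.inr hg, h⟩
      · rintro (h | ⟨g, (rfl | hg), h⟩)
        · exact Or.inl (Or.inl h)
        · exact Or.inl (Or.inr h)
        · exact Or.inr ⟨g, hg, h⟩

-- ===== VERDICT =====
theorem build_skill_section_py_spec : Claim_equal_build_skill_section_py := by
  intro xs _
  unfold Spec_build_skill_section_py
  have key : ∀ x : Int, (x = 0 ∨ x = 1 ∨ x = 2) →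
      (PySem.Set.contains (pvCollect xs PySem.Set.empty) x = true ↔ ∃ f ∈ xs, pvHit x f) := by
    intro x hx
    rw [PySem.Set.contains_iff,
        mem_pvCollect xs PySem.Set.empty List.nodup_nil (by simp [PySem.Set.empty]) x hx]
    simp [PySem.Set.empty]
  have d0 : PySem.Set.contains (pvCollect xs PySem.Set.empty) 0
      = xs.any (fun f => PySem.Str.endswith f "SKILL.md") := by
    rw [Bool.eq_iff_iff, key 0 (by tauto), List.any_eq_true]
    simp [pvHit]
  have d1 : PySem.Set.contains (pvCollect xs PySem.Set.empty) 1
      = xs.any (fun f => PySem.Str.isIn "/scripts/" f) := by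
    rw [Bool.eq_iff_iff, key 1 (by tauto), List.any_eq_true]
    simp [pvHit]
  have d2 : PySem.Set.contains (pvCollect xs PySem.Set.empty) 2
      = xs.any (fun f => f == "skills/README.md") := by
    rw [Bool.eq_iff_iff, key 2 (by tauto), List.any_eq_true]
    simp [pvHit]
  unfold build_skill_section_py build_skill_section_py_alt
  cases hA : xs.any (fun f => PySem.Str.endswith f "SKILL.md") <;>
  cases hB : xs.any (fun f => PySem.Str.isIn "/scripts/" f) <;>
  cases hC : xs.any (fun f => f == "skills/README.md") <;>
  simp only [pvBullets, PySem.List.enumerate_cons, PySem.List.enumerate_nil, Int.reduceAdd,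
    List.filter_cons, List.filter_nil, d0, d1, d2, hA, hB, hC] <;>
  rfl
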